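-- pv_equiv track=rewrite | github.com/modlink-studio/ModLink-Studio | packages/modlink_ui/modlink_ui/features/replay/recordings_page.py | _wrap_recording_text_for_display
-- ===== SOURCE A (Python) =====
-- def _wrap_recording_text_for_display(text: str) -> str:
--     if len(text) <= 24:
--         return text
--
--     parts: list[str] = []
--     chunk_length = 0
--     for char in text:
--         parts.append(char)
--         chunk_length += 1
--         if char in "_-/\\.":
--             parts.append("\u200b")
--             chunk_length = 0
--         elif chunk_length >= 16:
--             parts.append("\u200b")
--             chunk_length = 0
--     return "".join(parts)
-- ===== SOURCE B (Python) =====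
-- def _wrap_recording_text_for_display(text: str) -> str:
--     if len(text) <= 24:
--         return text
--
--     seps = "_-/\\."
--     out: list[str] = []
--     i = 0
--     n = len(text)
--     while i < n:
--         if text[i] in seps:
--             out.append(text[i])
--             out.append("\u200b")
--             i += 1
--         else:
--             j = i
--             while j < n and text[j] not in seps:
--                 j += 1
--             run = text[i:j]
--             for k in range(0, len(run), 16):
--                 out.append(run[k:k + 16])
--                 if k + 16 <= len(run):
--                     out.append("\u200b")
--             i = j
--     return "".join(out)
-- ===== Notes on version B (the rewrite author's own statement) =====
-- stated objective: alternative
-- what changed: Replaces A's per-character loop with a running chunk counter by a run-splitting pass: the text is scanned as separators and maximal separator-free runs, each run sliced into 16-char chunks with a zero-width space after each complete chunk and after each separator.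
import Mathlib
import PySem

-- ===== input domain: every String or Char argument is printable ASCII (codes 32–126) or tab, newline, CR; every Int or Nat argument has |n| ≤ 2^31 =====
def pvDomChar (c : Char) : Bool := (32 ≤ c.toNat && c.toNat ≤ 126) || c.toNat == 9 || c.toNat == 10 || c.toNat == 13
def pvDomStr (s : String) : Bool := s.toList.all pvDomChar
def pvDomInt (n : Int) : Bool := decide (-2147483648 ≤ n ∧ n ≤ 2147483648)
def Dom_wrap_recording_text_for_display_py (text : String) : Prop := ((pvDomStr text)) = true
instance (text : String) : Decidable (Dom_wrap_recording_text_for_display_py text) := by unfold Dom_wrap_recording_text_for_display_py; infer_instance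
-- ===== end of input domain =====

-- B replaces A's per-character counter loop by splitting the text into separator
-- characters and maximal separator-free runs, slicing each run into 16-char chunks
-- (objective: alternative decomposition; same O(n) cost).

-- `char in "_-/\\."` (exact: membership of a char in that 5-char string)
def pvIsSep (c : Char) : Bool := c = '_' || c = '-' || c = '/' || c = '\\' || c = '.'

def pvZWS : Char := '\u200b'

-- ===== PORT A =====
-- A's for-loop: state = (parts so far as chars, chunk_length)
def pvAStep (st : List Char × Nat) (c : Char) : List Char × Nat :=
  let parts := st.1 ++ [c]
  let cnt := st.2 + 1
  if pvIsSep c then (parts ++ [pvZWS], 0)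
  else if cnt ≥ 16 then (parts ++ [pvZWS], 0)
  else (parts, cnt)

def wrap_recording_text_for_display_py (text : String) : String :=
  if PySem.Str.len text ≤ 24 then text
  else String.ofList (text.toList.foldl pvAStep ([], 0)).1

-- ===== PORT B =====
-- inner `for k in range(0, len(run), 16)` loop of Source B: emit run in 16-char slices,
-- a ZWS after each slice that is complete (k + 16 <= len(run))
def pvBChunk (run : List Char) : List Char :=
  if run = [] then []
  else if run.length < 16 then run
  else run.take 16 ++ pvZWS :: pvBChunk (run.drop 16)
termination_by run.length
decreasing_by simp_all; omega

-- outer while-loop of Source B over the text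
def pvBGo (l : List Char) : List Char :=
  match l with
  | [] => []
  | c :: rest =>
    if pvIsSep c then c :: pvZWS :: pvBGo rest
    else pvBChunk ((c :: rest).takeWhile (fun x => ¬ pvIsSep x)) ++
         pvBGo ((c :: rest).dropWhile (fun x => ¬ pvIsSep x))
termination_by l.length
decreasing_by
  · simp
  · simp_all [List.dropWhile]
    exact List.length_dropWhile_le _ _

def wrap_recording_text_for_display_py_alt (text : String) : String :=
  if PySem.Str.len text ≤ 24 then text
  else String.ofList (pvBGo text.toList)

-- ===== PRECONDITION & SPEC =====
def Spec_wrap_recording_text_for_display_py (text : String) (out : String) : Prop := out = wrap_recording_text_for_display_py_alt text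
instance (text : String) (out : String) : Decidable (Spec_wrap_recording_text_for_display_py text out) := by unfold Spec_wrap_recording_text_for_display_py; infer_instance

-- ===== CLAIM (what is proved, stated in full; the proofs are below) =====
def Claim_equal_wrap_recording_text_for_display_py : Prop := ∀ (text : String), Dom_wrap_recording_text_for_display_py text → Spec_wrap_recording_text_for_display_py text (wrap_recording_text_for_display_py text)

-- ===== LEMMAS AND PROOFS =====

-- A's loop, rewritten without the accumulator (tail of the fold)
def pvAGo (l : List Char) (cnt : Nat) : List Char :=
  match l with
  | [] => []
  | c :: rest =>
    if pvIsSep c then c :: pvZWS :: pvAGo rest 0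
    else if cnt + 1 ≥ 16 then c :: pvZWS :: pvAGo rest 0
    else c :: pvAGo rest (cnt + 1)

theorem pvAFold (l : List Char) (acc : List Char) (cnt : Nat) :
    (l.foldl pvAStep (acc, cnt)).1 = acc ++ pvAGo l cnt := by
  induction l generalizing acc cnt with
  | nil => simp [pvAGo]
  | cons c rest ih =>
    simp only [List.foldl, pvAStep, pvAGo]
    split_ifs with h1 h2 <;> simp [ih]

-- dead counter: when the list is empty or starts with a separator,
-- A's loop ignores the incoming counter
theorem pvAGo_cnt_irrel (l : List Char) (h : l = [] ∨ ∃ c rest, l = c :: rest ∧ pvIsSep c = true)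
    (a b : Nat) : pvAGo l a = pvAGo l b := by
  rcases h with h | ⟨c, rest, rfl, hc⟩
  · subst h; rfl
  · simp [pvAGo, hc]

-- consuming a short separator-free prefix just advances the counter
-- (and emits a ZWS exactly if it lands on 16)
theorem pvAGo_run (l xs : List Char) (cnt : Nat)
    (hn : ∀ c ∈ l, pvIsSep c = false) (hle : cnt + l.length ≤ 16) (hc : cnt ≤ 15) :
    pvAGo (l ++ xs) cnt =
      if cnt + l.length = 16 then l ++ pvZWS :: pvAGo xs 0
      else l ++ pvAGo xs (cnt + l.length) := by
  induction l generalizing cnt with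
  | nil => simp; omega
  | cons c rest ih =>
    have hcsep : pvIsSep c = false := hn c (by simp)
    simp only [List.cons_append, pvAGo, hcsep, Bool.false_eq_true, if_false, List.length_cons]
    by_cases h15 : cnt = 15
    · have hrest : rest = [] := by
        cases rest with
        | nil => rfl
        | cons x t => simp [h15] at hle; omega
      subst hrest; subst h15
      simp
    · have : ¬ cnt + 1 ≥ 16 := by omega
      rw [if_neg this, ih (cnt + 1) (fun c hc => hn c (by simp [hc])) (by simp at hle; omega) (by omega)]
      by_cases h16 : cnt + 1 + rest.length = 16
      · rw [if_pos h16, if_pos (by omega)]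
      · rw [if_neg h16, if_neg (by omega)]
        have h' : cnt + 1 + rest.length = cnt + (rest.length + 1) := by omega
        simp [h']

-- the run lemma: A's loop on (run ++ rest) with counter 0 produces B's chunking
-- of the run, provided rest is empty or starts with a separator
theorem pvAGo_chunks (n : Nat) (run rest : List Char)
    (hlen : run.length ≤ n)
    (hn : ∀ c ∈ run, pvIsSep c = false)
    (hr : rest = [] ∨ ∃ c t, rest = c :: t ∧ pvIsSep c = true) :
    pvAGo (run ++ rest) 0 = pvBChunk run ++ pvAGo rest 0 := by
  induction n generalizing run with
  | zero =>
    have : run = [] := List.eq_nil_of_length_eq_zero (by omega)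
    subst this; simp [pvBChunk]
  | succ n ih =>
    by_cases hsmall : run.length < 16
    · rw [pvAGo_run run rest 0 hn (by omega) (by omega)]
      by_cases hz : run = []
      · subst hz; simp [pvBChunk]
      · rw [if_neg (by omega)]
        rw [Nat.zero_add, pvAGo_cnt_irrel rest hr run.length 0]
        simp [pvBChunk, hz, hsmall]
    · have h16 : (run.take 16).length = 16 := by simp; omega
      have hsplit : run = run.take 16 ++ run.drop 16 := (List.take_append_drop 16 run).symm
      conv_lhs => rw [hsplit]
      rw [List.append_assoc,
          pvAGo_run (run.take 16) (run.drop 16 ++ rest) 0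
            (fun c hc => hn c (List.mem_of_mem_take hc)) (by omega) (by omega),
          if_pos (by omega)]
      rw [ih (run.drop 16) (by simp; omega) (fun c hc => hn c (List.mem_of_mem_drop hc))]
      have hne : ¬ run = [] := fun h => by subst h; simp at hsmall
      have hlt : ¬ run.length < 16 := by omega
      conv_rhs => rw [pvBChunk, if_neg hne, if_neg hlt]
      simp

theorem pvAGo_eq_pvBGo (n : Nat) (l : List Char) (hlen : l.length ≤ n) :
    pvAGo l 0 = pvBGo l := by
  induction n generalizing l with
  | zero =>
    have : l = [] := List.eq_nil_of_length_eq_zero (by omega)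
    subst this; simp [pvAGo, pvBGo]
  | succ n ih =>
    match l with
    | [] => simp [pvAGo, pvBGo]
    | c :: rest =>
      by_cases hc : pvIsSep c
      · rw [pvBGo]
        simp only [hc, if_true, pvAGo]
        rw [ih rest (by simp at hlen; omega)]
      · rw [pvBGo]
        simp only [hc, Bool.false_eq_true, if_false]
        set run := (c :: rest).takeWhile (fun x => ¬ pvIsSep x) with hrun
        set rest' := (c :: rest).dropWhile (fun x => ¬ pvIsSep x) with hrest'
        have hsplit : c :: rest = run ++ rest' := (List.takeWhile_append_dropWhile).symm
        have hrunpos : 0 < run.length := by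
          rw [hrun]; simp [List.takeWhile, hc]
        have hrest'small : rest'.length < (c :: rest).length := by
          have : (c :: rest).length = run.length + rest'.length := by
            rw [hsplit]; simp
          omega
        rw [hsplit,
            pvAGo_chunks run.length run rest' le_rfl
              (fun x hx => by
                have := List.mem_takeWhile_imp (hrun ▸ hx)
                simpa using this)
              (by
                cases h : rest' with
                | nil => exact Or.inl rfl
                | cons x t =>
                  refine Or.inr ⟨x, t, rfl, ?_⟩
                  have := List.head?_dropWhile_not (fun x => ¬ pvIsSep x) (c :: rest)
                  rw [← hrest'] at this
                  simp [h] at this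
                  exact this)]
        rw [ih rest' (by simp only [List.length_cons] at hlen hrest'small; omega)]

-- ===== VERDICT (by name: the statement is the Claim_ definition above) =====
theorem wrap_recording_text_for_display_py_spec : Claim_equal_wrap_recording_text_for_display_py := by
  intro text _
  unfold Spec_wrap_recording_text_for_display_py wrap_recording_text_for_display_py wrap_recording_text_for_display_py_alt
  split_ifs with h
  · rfl
  · rw [pvAFold, List.nil_append, pvAGo_eq_pvBGo text.toList.length _ le_rfl]
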